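-- pv_equiv track=rewrite | github.com/eroge-69/PyToExe | python-files/ubs_pac_gui_app.py | determine_ubs_level
-- ===== SOURCE A (Python) =====
-- def determine_ubs_level(failed):
--     LEVEL_1 = ["Document tagging", "Natural language", "Metadata and settings"]
--     LEVEL_2 = LEVEL_1 + ["PDF syntax", "Alternative description", "Table tagging"]
--     LEVEL_3 = LEVEL_2 + ["Fonts", "Structure tree", "Role mapping"]
--     LEVEL_4 = LEVEL_3 + ["PDF/UA identifier"]
--
--     for level, checks in zip([4,3,2,1], [LEVEL_4, LEVEL_3, LEVEL_2, LEVEL_1]):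
--         if all(check not in failed for check in checks):
--             return f"Level {level}"
--     return "Below Level 1"
-- ===== SOURCE B (Python) =====
-- def determine_ubs_level(failed):
--     tier = {
--         "Document tagging": 1, "Natural language": 1, "Metadata and settings": 1,
--         "PDF syntax": 2, "Alternative description": 2, "Table tagging": 2,
--         "Fonts": 3, "Structure tree": 3, "Role mapping": 3,
--         "PDF/UA identifier": 4,
--     }
--     achievable = 4
--     for check in failed:
--         if check in tier:
--             achievable = min(achievable, tier[check] - 1)
--     return f"Level {achievable}" if achievable >= 1 else "Below Level 1"
-- ===== Notes on version B (the rewrite author's own statement) =====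
-- stated objective: simpler
-- what changed: Instead of rescanning each cumulative level list top-down until one has no failed check, B indexes each check by its introducing tier in a dict and makes one pass over `failed`, taking the minimum of (tier-1); the traversal is inverted (over failed, not over the level lists).
import Mathlib
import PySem

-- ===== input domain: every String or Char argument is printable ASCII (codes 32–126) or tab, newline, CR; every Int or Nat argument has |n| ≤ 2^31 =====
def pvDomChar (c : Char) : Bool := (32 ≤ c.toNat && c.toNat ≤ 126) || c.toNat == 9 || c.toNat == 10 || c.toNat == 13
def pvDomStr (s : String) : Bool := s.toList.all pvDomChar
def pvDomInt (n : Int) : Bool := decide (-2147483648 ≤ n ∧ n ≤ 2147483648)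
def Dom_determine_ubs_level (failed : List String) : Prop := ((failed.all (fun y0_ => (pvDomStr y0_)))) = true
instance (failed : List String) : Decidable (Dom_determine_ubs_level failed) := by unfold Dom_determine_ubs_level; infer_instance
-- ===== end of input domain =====

-- B indexes each check by its introducing tier in a dict and makes one min-pass over
-- `failed`, instead of A's top-down rescan of each cumulative level list: simpler, same result.

-- ===== PORT A =====
def pvLevel1 : List String := ["Document tagging", "Natural language", "Metadata and settings"]
def pvLevel2 : List String := pvLevel1 ++ ["PDF syntax", "Alternative description", "Table tagging"]
def pvLevel3 : List String := pvLevel2 ++ ["Fonts", "Structure tree", "Role mapping"]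
def pvLevel4 : List String := pvLevel3 ++ ["PDF/UA identifier"]

-- the for-loop with early return over zip([4,3,2,1],[L4,L3,L2,L1]) is the first pair whose checks all avoid `failed`
def determine_ubs_level (failed : List String) : String :=
  match ([((4:Int), pvLevel4), (3, pvLevel3), (2, pvLevel2), (1, pvLevel1)]).find?
      (fun p => p.2.all (fun check => !(failed.contains check))) with
  | some p => "Level " ++ PySem.Int.toStr p.1
  | none => "Below Level 1"

-- ===== PORT B =====
def pvTier : PySem.Dict String Int := PySem.Dict.ofList
  [("Document tagging", 1), ("Natural language", 1), ("Metadata and settings", 1),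
   ("PDF syntax", 2), ("Alternative description", 2), ("Table tagging", 2),
   ("Fonts", 3), ("Structure tree", 3), ("Role mapping", 3),
   ("PDF/UA identifier", 4)]

def determine_ubs_level_alt (failed : List String) : String :=
  let achievable : Int := failed.foldl
    (fun acc check =>
      match pvTier.get? check with
      | some t => min acc (t - 1)
      | none => acc) 4
  if achievable ≥ 1 then "Level " ++ PySem.Int.toStr achievable else "Below Level 1"

-- ===== PRECONDITION & SPEC =====
def Spec_determine_ubs_level (failed : List String) (out : String) : Prop := out = determine_ubs_level_alt failed
instance (failed : List String) (out : String) : Decidable (Spec_determine_ubs_level failed out) := by unfold Spec_determine_ubs_level; infer_instance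

-- ===== CLAIM (what is proved, stated in full; the proofs are below) =====
def Claim_equal_determine_ubs_level : Prop := ∀ (failed : List String), Dom_determine_ubs_level failed → Spec_determine_ubs_level failed (determine_ubs_level failed)

-- ===== LEMMAS AND PROOFS =====

-- the "damage" of one check: tier-1 if known, a harmless 4 otherwise
def pvG (c : String) : Int :=
  match pvTier.get? c with
  | some t => t - 1
  | none => 4

def pvStep (acc : Int) (c : String) : Int :=
  match pvTier.get? c with
  | some t => min acc (t - 1)
  | none => acc

theorem pvTier_eq_mk : pvTier = PySem.Dict.mk
  [("Document tagging", 1), ("Natural language", 1), ("Metadata and settings", 1),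
   ("PDF syntax", 2), ("Alternative description", 2), ("Table tagging", 2),
   ("Fonts", 3), ("Structure tree", 3), ("Role mapping", 3),
   ("PDF/UA identifier", 4)] := by decide

theorem pvG_nonneg (c : String) : 0 ≤ pvG c := by
  simp only [pvG, pvTier_eq_mk, PySem.Dict.get?_mk_cons]
  split_ifs <;> simp [PySem.Dict.get?]

theorem pvG_mem4 (c : String) : pvG c ≤ 3 ↔ c ∈ pvLevel4 := by
  simp only [pvG, pvTier_eq_mk, PySem.Dict.get?_mk_cons]
  split_ifs <;> simp_all [PySem.Dict.get?, pvLevel4, pvLevel3, pvLevel2, pvLevel1, @eq_comm String c]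

theorem pvG_mem3 (c : String) : pvG c ≤ 2 ↔ c ∈ pvLevel3 := by
  simp only [pvG, pvTier_eq_mk, PySem.Dict.get?_mk_cons]
  split_ifs <;> simp_all [PySem.Dict.get?, pvLevel3, pvLevel2, pvLevel1, @eq_comm String c]

theorem pvG_mem2 (c : String) : pvG c ≤ 1 ↔ c ∈ pvLevel2 := by
  simp only [pvG, pvTier_eq_mk, PySem.Dict.get?_mk_cons]
  split_ifs <;> simp_all [PySem.Dict.get?, pvLevel2, pvLevel1, @eq_comm String c]

theorem pvG_mem1 (c : String) : pvG c ≤ 0 ↔ c ∈ pvLevel1 := by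
  simp only [pvG, pvTier_eq_mk, PySem.Dict.get?_mk_cons]
  split_ifs <;> simp_all [PySem.Dict.get?, pvLevel1, @eq_comm String c]

theorem pvStep_le (a : Int) (c : String) : pvStep a c ≤ a := by
  unfold pvStep; split
  · exact min_le_left _ _
  · exact le_refl a

theorem pvStep_nonneg (a : Int) (c : String) (h : 0 ≤ a) : 0 ≤ pvStep a c := by
  rcases hh : pvTier.get? c with _ | t
  · simpa [pvStep, hh]
  · have hg := pvG_nonneg c
    simp only [pvG, hh] at hg
    simp only [pvStep, hh]
    exact le_min h hg

theorem pvStep_le_iff (a : Int) (c : String) (ha : a ≤ 4) (m : Int) :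
    pvStep a c ≤ m ↔ a ≤ m ∨ pvG c ≤ m := by
  rcases h : pvTier.get? c with _ | t
  · simp [pvStep, pvG, h]; omega
  · simp [pvStep, pvG, h]


theorem fold_le_iff (xs : List String) (a : Int) (ha : a ≤ 4) (m : Int) :
    xs.foldl pvStep a ≤ m ↔ a ≤ m ∨ ∃ c ∈ xs, pvG c ≤ m := by
  induction xs generalizing a with
  | nil => simp
  | cons c xs ih =>
    simp only [List.foldl_cons]
    rw [ih _ (le_trans (pvStep_le a c) ha), pvStep_le_iff a c ha]
    constructor
    · rintro ((h | h) | ⟨c', hc', h⟩)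
      · exact Or.inl h
      · exact Or.inr ⟨c, List.mem_cons_self, h⟩
      · exact Or.inr ⟨c', List.mem_cons_of_mem _ hc', h⟩
    · rintro (h | ⟨c', hc', h⟩)
      · exact Or.inl (Or.inl h)
      · rcases List.mem_cons.mp hc' with rfl | hmem
        · exact Or.inl (Or.inr h)
        · exact Or.inr ⟨c', hmem, h⟩

theorem fold_le (xs : List String) (a : Int) : xs.foldl pvStep a ≤ a := by
  induction xs generalizing a with
  | nil => simp
  | cons c xs ih => exact le_trans (ih _) (pvStep_le a c)

theorem fold_nonneg (xs : List String) (a : Int) (h : 0 ≤ a) : 0 ≤ xs.foldl pvStep a := by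
  induction xs generalizing a with
  | nil => simpa
  | cons c xs ih => exact ih _ (pvStep_nonneg a c h)

theorem allOut_iff (L failed : List String) :
    (L.all (fun check => !(failed.contains check))) = true ↔ ¬ ∃ c ∈ failed, c ∈ L := by
  simp [List.all_eq_true]
  constructor
  · intro h c hc hcL; exact (h c hcL) hc
  · intro h c hcL hc; exact h c hc hcL

theorem determine_ubs_level_spec : Claim_equal_determine_ubs_level := by
  intro failed _
  unfold Spec_determine_ubs_level determine_ubs_level determine_ubs_level_alt
  have hstep : (fun (acc : Int) (check : String) =>
      match pvTier.get? check with
      | some t => min acc (t - 1)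
      | none => acc) = pvStep := rfl
  rw [hstep]
  set r := failed.foldl pvStep 4 with hr
  have hub : r ≤ 4 := fold_le failed 4
  have hlb : 0 ≤ r := fold_nonneg failed 4 (by omega)
  have H4 : r ≤ 3 ↔ ∃ c ∈ failed, c ∈ pvLevel4 := by
    rw [hr, fold_le_iff failed 4 (le_refl 4) 3]; simp only [pvG_mem4]; norm_num
  have H3 : r ≤ 2 ↔ ∃ c ∈ failed, c ∈ pvLevel3 := by
    rw [hr, fold_le_iff failed 4 (le_refl 4) 2]; simp only [pvG_mem3]; norm_num
  have H2 : r ≤ 1 ↔ ∃ c ∈ failed, c ∈ pvLevel2 := by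
    rw [hr, fold_le_iff failed 4 (le_refl 4) 1]; simp only [pvG_mem2]; norm_num
  have H1 : r ≤ 0 ↔ ∃ c ∈ failed, c ∈ pvLevel1 := by
    rw [hr, fold_le_iff failed 4 (le_refl 4) 0]; simp only [pvG_mem1]; norm_num
  have cT : ∀ L : List String, (¬ ∃ c ∈ failed, c ∈ L) → (L.all fun check => !(failed.contains check)) = true :=
    fun L h => (allOut_iff L failed).mpr h
  have cF : ∀ L : List String, (∃ c ∈ failed, c ∈ L) → (L.all fun check => !(failed.contains check)) = false := by
    intro L h
    rw [Bool.eq_false_iff]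
    intro ht
    exact ((allOut_iff L failed).mp ht) h
  have hsub21 : ∀ c, c ∈ pvLevel1 → c ∈ pvLevel2 := by intro c; simp [pvLevel2]; tauto
  have hsub32 : ∀ c, c ∈ pvLevel2 → c ∈ pvLevel3 := by intro c; simp [pvLevel3]; tauto
  have hsub43 : ∀ c, c ∈ pvLevel3 → c ∈ pvLevel4 := by intro c; simp [pvLevel4]; tauto
  have hcase : r = 0 ∨ r = 1 ∨ r = 2 ∨ r = 3 ∨ r = 4 := by omega
  rcases hcase with hc | hc | hc | hc | hc
  · obtain ⟨c, hcf, hcl⟩ := H1.mp (by omega)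
    rw [List.find?,
      cF pvLevel4 ⟨c, hcf, hsub43 c (hsub32 c (hsub21 c hcl))⟩, List.find?,
      cF pvLevel3 ⟨c, hcf, hsub32 c (hsub21 c hcl)⟩, List.find?,
      cF pvLevel2 ⟨c, hcf, hsub21 c hcl⟩, List.find?,
      cF pvLevel1 ⟨c, hcf, hcl⟩, hc]
    rfl
  · obtain ⟨c, hcf, hcl⟩ := H2.mp (by omega)
    rw [List.find?,
      cF pvLevel4 ⟨c, hcf, hsub43 c (hsub32 c hcl)⟩, List.find?,
      cF pvLevel3 ⟨c, hcf, hsub32 c hcl⟩, List.find?,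
      cF pvLevel2 ⟨c, hcf, hcl⟩, List.find?,
      cT pvLevel1 (fun hex => by have := H1.mpr hex; omega), hc]
    rfl
  · obtain ⟨c, hcf, hcl⟩ := H3.mp (by omega)
    rw [List.find?,
      cF pvLevel4 ⟨c, hcf, hsub43 c hcl⟩, List.find?,
      cF pvLevel3 ⟨c, hcf, hcl⟩, List.find?,
      cT pvLevel2 (fun hex => by have := H2.mpr hex; omega), hc]
    rfl
  · obtain ⟨c, hcf, hcl⟩ := H4.mp (by omega)
    rw [List.find?,
      cF pvLevel4 ⟨c, hcf, hcl⟩, List.find?,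
      cT pvLevel3 (fun hex => by have := H3.mpr hex; omega), hc]
    rfl
  · rw [List.find?, cT pvLevel4 (fun hex => by have := H4.mpr hex; omega), hc]
    rfl
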